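-- pv_equiv track=rewrite | github.com/lucasvtiradentes/md-align | src/mdalign/checks/list_descs.py | _in_code_block
-- ===== SOURCE A (Python) =====
-- def _in_code_block(lines):
--     inside = set()
--     in_code = False
--     for i, line in enumerate(lines):
--         if line.rstrip("\n").strip().startswith("```"):
--             in_code = not in_code
--             continue
--         if in_code:
--             inside.add(i)
--     return inside
-- ===== SOURCE B (Python) =====
-- def _in_code_block(lines):
--     # Pass 1: indices of fence lines; pass 2: pair them up (an unclosed
--     # trailing fence opens a block running to the end of the input).
--     fences = [i for i, line in enumerate(lines)
--               if line.rstrip("\n").strip().startswith("```")]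
--     inside = set()
--     k = 0
--     while k < len(fences):
--         close = fences[k + 1] if k + 1 < len(fences) else len(lines)
--         inside.update(range(fences[k] + 1, close))
--         k += 2
--     return inside
-- ===== Notes on version B (the rewrite author's own statement) =====
-- stated objective: alternative
-- what changed: Replaces A's single-pass boolean toggle with a two-pass scheme: first collect all fence-line indices, then pair them up and emit each open..close index range (an unclosed final fence runs to the end of the input).
import Mathlib
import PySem

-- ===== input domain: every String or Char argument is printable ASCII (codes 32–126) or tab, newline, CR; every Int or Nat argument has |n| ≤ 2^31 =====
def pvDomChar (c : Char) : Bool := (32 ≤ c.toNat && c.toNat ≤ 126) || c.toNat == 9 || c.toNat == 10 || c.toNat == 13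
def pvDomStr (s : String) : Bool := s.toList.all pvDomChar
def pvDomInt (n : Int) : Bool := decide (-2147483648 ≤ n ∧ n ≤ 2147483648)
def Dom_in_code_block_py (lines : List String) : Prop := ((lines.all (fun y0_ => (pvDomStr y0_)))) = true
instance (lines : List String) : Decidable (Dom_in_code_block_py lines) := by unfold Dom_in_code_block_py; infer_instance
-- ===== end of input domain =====

-- ===== PORT A =====
-- B changes the decomposition (fence indices collected first, then paired into ranges); same cost. A and B agree on all inputs.
-- hand port of str.rstrip("\n"): exact (drops trailing '\n' characters; PySem has no rstrip-with-chars)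
def rstripNl (s : String) : String := String.ofList ((s.toList.reverse.dropWhile (· == '\n')).reverse)

-- the shared fence predicate: line.rstrip("\n").strip().startswith("```")
def isFence (line : String) : Bool :=
  PySem.Str.startswith (PySem.Str.strip (rstripNl line)) "```"

def in_code_block_py (lines : List String) : List Int :=
  ((PySem.List.enumerate lines 0).foldl
    (fun (st : PySem.Set Int × Bool) p =>
      if isFence p.2 then (st.1, !st.2)
      else if st.2 then (PySem.Set.add st.1 p.1, st.2)
      else st)
    ((PySem.Set.empty : PySem.Set Int), false)).1

-- ===== PORT B =====
-- pass 1: indices of fence lines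
def fencesOf (lines : List String) : List Int :=
  (PySem.List.enumerate lines 0).filterMap (fun p => if isFence p.2 then some p.1 else none)

-- pass 2: consume fences two at a time; an unclosed final fence runs to n = len(lines)
def collectB (n : Int) : List Int → PySem.Set Int → PySem.Set Int
  | o :: c :: rest, s => collectB n rest (PySem.Set.update s (PySem.List.pyRange (o+1) c 1))
  | [o], s => PySem.Set.update s (PySem.List.pyRange (o+1) n 1)
  | [], s => s

def in_code_block_py_alt (lines : List String) : List Int :=
  collectB (lines.length : Int) (fencesOf lines) (PySem.Set.empty : PySem.Set Int)

-- ===== PRECONDITION & SPEC =====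
def Spec_in_code_block_py (lines : List String) (out : List Int) : Prop := out = in_code_block_py_alt lines
instance (lines : List String) (out : List Int) : Decidable (Spec_in_code_block_py lines out) := by unfold Spec_in_code_block_py; infer_instance

-- ===== CLAIM (what is proved, stated in full; the proofs are below) =====
def Claim_equal_in_code_block_py : Prop := ∀ (lines : List String), Dom_in_code_block_py lines → Spec_in_code_block_py lines (in_code_block_py lines)

-- ===== LEMMAS AND PROOFS =====

-- what A's loop appends, as a pure recursion over the lines
def bodyA : Int → List String → Bool → List Int
  | _, [], _ => []
  | s, l :: ls, b =>
    if isFence l then bodyA (s+1) ls (!b)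
    else if b then s :: bodyA (s+1) ls b
    else bodyA (s+1) ls b

-- fence indices, as a pure recursion
def fenceIdx : Int → List String → List Int
  | _, [] => []
  | s, l :: ls => if isFence l then s :: fenceIdx (s+1) ls else fenceIdx (s+1) ls

-- the paired ranges, one fence at a time with an inside/outside flag
def pbS (n : Int) : Bool → Int → List Int → List Int
  | b, p, [] => if b then PySem.List.pyRange p n 1 else []
  | b, p, f :: rest => (if b then PySem.List.pyRange p f 1 else []) ++ pbS n (!b) (f+1) rest

theorem add_append (s : List Int) (x : Int) (h : x ∉ s) : PySem.Set.add s x = s ++ [x] := by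
  simp [PySem.Set.add, PySem.Set.contains, h]

theorem update_nodup (xs : List Int) (s : List Int) (h : (s ++ xs).Nodup) :
    PySem.Set.update s xs = s ++ xs := by
  induction xs generalizing s with
  | nil => simp [PySem.Set.update]
  | cons x xs ih =>
    have hx : x ∉ s := by
      intro hmem
      exact (List.disjoint_of_nodup_append h) hmem (by simp)
    have : PySem.Set.update s (x :: xs) = PySem.Set.update (PySem.Set.add s x) xs := rfl
    rw [this, add_append s x hx, ih (s ++ [x]) (by simpa using h)]
    simp

theorem fenceIdx_lb (ls : List String) (s x : Int) (hx : x ∈ fenceIdx s ls) : s ≤ x := by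
  induction ls generalizing s with
  | nil => simp [fenceIdx] at hx
  | cons l ls ih =>
    simp only [fenceIdx] at hx
    split at hx
    · rcases List.mem_cons.mp hx with h | h
      · omega
      · have := ih (s+1) h; omega
    · have := ih (s+1) hx; omega

theorem fenceIdx_ub (ls : List String) (s x : Int) (hx : x ∈ fenceIdx s ls) : x < s + ls.length := by
  induction ls generalizing s with
  | nil => simp [fenceIdx] at hx
  | cons l ls ih =>
    simp only [fenceIdx] at hx
    simp only [List.length_cons]
    split at hx
    · rcases List.mem_cons.mp hx with h | h
      · omega
      · have := ih (s+1) h; push_cast at *; omega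
    · have := ih (s+1) hx; push_cast at *; omega

theorem fenceIdx_pairwise (ls : List String) (s : Int) : (fenceIdx s ls).Pairwise (· < ·) := by
  induction ls generalizing s with
  | nil => simp [fenceIdx]
  | cons l ls ih =>
    simp only [fenceIdx]
    split
    · exact List.Pairwise.cons (fun x hx => by have := fenceIdx_lb ls (s+1) x hx; omega) (ih (s+1))
    · exact ih (s+1)

theorem fencesOf_eq_aux (ls : List String) (s : Int) :
    (PySem.List.enumerate ls s).filterMap (fun p => if isFence p.2 then some p.1 else none)
      = fenceIdx s ls := by
  induction ls generalizing s with
  | nil => simp [PySem.List.enumerate_nil, fenceIdx]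
  | cons l ls ih =>
    rw [PySem.List.enumerate_cons]
    simp only [List.filterMap_cons, fenceIdx]
    by_cases hf : isFence l <;> simp [hf, ih (s+1)]

theorem pbS_false_p (fs : List Int) (n p q : Int) : pbS n false p fs = pbS n false q fs := by
  cases fs <;> simp [pbS]

theorem pbS_true_cons (fs : List Int) (n s : Int) (hn : s < n) (hfs : ∀ x ∈ fs, s < x) :
    pbS n true s fs = s :: pbS n true (s+1) fs := by
  cases fs with
  | nil => simp [pbS, PySem.List.pyRange_one_cons hn]
  | cons f rest =>
    have hf : s < f := hfs f (by simp)
    simp [pbS, PySem.List.pyRange_one_cons hf]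

theorem pbS_mem (fs : List Int) (n : Int) (b : Bool) (p y : Int) (hy : y ∈ pbS n b p fs) :
    p ≤ y ∨ ∃ f ∈ fs, f < y := by
  induction fs generalizing b p with
  | nil =>
    simp only [pbS] at hy
    split at hy
    · have := (PySem.List.mem_pyRange_one).mp hy; omega
    · simp at hy
  | cons f rest ih =>
    simp only [pbS, List.mem_append] at hy
    rcases hy with hy | hy
    · split at hy
      · have := (PySem.List.mem_pyRange_one).mp hy; omega
      · simp at hy
    · rcases ih (!b) (f+1) hy with h | ⟨f', hf', h⟩
      · exact Or.inr ⟨f, by simp, by omega⟩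
      · exact Or.inr ⟨f', by simp [hf'], h⟩

theorem pbS_pairwise (fs : List Int) (n : Int) (b : Bool) (p : Int)
    (hs : fs.Pairwise (· < ·)) (hn : ∀ x ∈ fs, x < n) (hp : ∀ x ∈ fs, p ≤ x) :
    (pbS n b p fs).Pairwise (· < ·) := by
  induction fs generalizing b p with
  | nil =>
    simp only [pbS]
    split
    · exact PySem.List.pairwise_lt_pyRange_one _ _
    · simp
  | cons f rest ih =>
    simp only [pbS]
    rw [List.pairwise_append]
    refine ⟨?_, ?_, ?_⟩
    · split
      · exact PySem.List.pairwise_lt_pyRange_one _ _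
      · simp
    · exact ih (!b) (f+1) (List.Pairwise.of_cons hs)
        (fun x hx => hn x (by simp [hx]))
        (fun x hx => by have := (List.pairwise_cons.mp hs).1 x hx; omega)
    · intro a ha y hy
      have ha' : a < f := by
        split at ha
        · have := (PySem.List.mem_pyRange_one).mp ha; omega
        · simp at ha
      rcases pbS_mem rest n (!b) (f+1) y hy with h | ⟨f', hf', h⟩
      · omega
      · have := (List.pairwise_cons.mp hs).1 f' hf'; omega

theorem bodyA_eq (ls : List String) (s : Int) (b : Bool) :
    bodyA s ls b = pbS (s + ls.length) b s (fenceIdx s ls) := by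
  induction ls generalizing s b with
  | nil =>
    cases b <;> simp [bodyA, fenceIdx, pbS, PySem.List.pyRange_one_eq_nil]
  | cons l ls ih =>
    have hlen : s + (List.length (l :: ls) : Int) = (s+1) + (ls.length : Int) := by
      simp; omega
    simp only [bodyA, fenceIdx]
    by_cases hf : isFence l
    · simp only [hf, if_pos]
      rw [hlen, ih (s+1) (!b)]
      cases b <;> simp [pbS, PySem.List.pyRange_one_eq_nil (le_refl s)]
    · simp only [hf, Bool.false_eq_true, if_false]
      cases b with
      | false =>
        simp only [if_false, Bool.false_eq_true]
        rw [hlen, ih (s+1) false, pbS_false_p _ _ (s+1) s]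
      | true =>
        simp only [if_true]
        rw [hlen, ih (s+1) true]
        rw [pbS_true_cons (fenceIdx (s+1) ls) ((s+1) + (ls.length : Int)) s
          (by omega) (fun x hx => by have := fenceIdx_lb ls (s+1) x hx; omega)]

theorem foldA_eq (ls : List String) (s : Int) (acc : List Int) (b : Bool)
    (hacc : ∀ x ∈ acc, x < s) :
    ((PySem.List.enumerate ls s).foldl
      (fun (st : PySem.Set Int × Bool) p =>
        if isFence p.2 then (st.1, !st.2)
        else if st.2 then (PySem.Set.add st.1 p.1, st.2)
        else st)
      (acc, b)).1 = acc ++ bodyA s ls b := by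
  induction ls generalizing s acc b with
  | nil => simp [PySem.List.enumerate_nil, bodyA]
  | cons l ls ih =>
    rw [PySem.List.enumerate_cons]
    simp only [List.foldl_cons, bodyA]
    by_cases hf : isFence l
    · simp only [hf, if_true]
      rw [ih (s+1) acc (!b) (fun x hx => by have := hacc x hx; omega)]
    · simp only [hf, Bool.false_eq_true, if_false]
      cases b with
      | false =>
        simp only [Bool.false_eq_true, if_false]
        rw [ih (s+1) acc false (fun x hx => by have := hacc x hx; omega)]
      | true =>
        simp only [if_true]
        have hs : s ∉ acc := fun hmem => by have := hacc s hmem; omega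
        rw [show PySem.Set.add acc s = acc ++ [s] from add_append acc s hs]
        rw [ih (s+1) (acc ++ [s]) true
          (fun x hx => by rcases List.mem_append.mp hx with h | h
                          · have := hacc x h; omega
                          · simp at h; omega)]
        simp

theorem collectB_eq (fs : List Int) (n : Int) (acc : List Int) (p : Int)
    (h : (acc ++ pbS n false p fs).Nodup) :
    collectB n fs acc = acc ++ pbS n false p fs := by
  revert h
  induction fs, acc using collectB.induct generalizing p with
  | case1 o c rest acc ih =>
    intro h
    have hstep : pbS n false p (o :: c :: rest)
        = PySem.List.pyRange (o+1) c 1 ++ pbS n false (c+1) rest := by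
      simp [pbS]
    rw [hstep] at h ⊢
    have hup : PySem.Set.update acc (PySem.List.pyRange (o+1) c 1)
        = acc ++ PySem.List.pyRange (o+1) c 1 := by
      apply update_nodup
      exact h.sublist (by simp)
    rw [show collectB n (o :: c :: rest) acc
        = collectB n rest (PySem.Set.update acc (PySem.List.pyRange (o+1) c 1)) from rfl]
    rw [hup] at ih ⊢
    rw [ih (c+1) (by simpa using h)]
    simp
  | case2 o acc =>
    intro h
    have hstep : pbS n false p [o] = PySem.List.pyRange (o+1) n 1 := by simp [pbS]
    rw [hstep] at h ⊢
    exact update_nodup _ _ h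
  | case3 acc =>
    intro _
    simp [pbS, collectB]

-- ===== VERDICT (by name: the statement is the Claim_ definition above) =====
theorem in_code_block_py_spec : Claim_equal_in_code_block_py := by
  intro lines _
  unfold Spec_in_code_block_py in_code_block_py in_code_block_py_alt
  have hA := foldA_eq lines 0 [] false (by simp)
  have hfn := fencesOf_eq_aux lines 0
  have hsorted := fenceIdx_pairwise lines 0
  have hnodup : (([] : List Int) ++ pbS (lines.length : Int) false 0 (fenceIdx 0 lines)).Nodup := by
    simp only [List.nil_append]
    exact (pbS_pairwise _ _ _ _ hsorted
      (fun x hx => by have := fenceIdx_ub lines 0 x hx; omega)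
      (fun x hx => fenceIdx_lb lines 0 x hx)).imp (fun h => LT.lt.ne h)
  have hB := collectB_eq (fenceIdx 0 lines) (lines.length : Int) [] 0 hnodup
  unfold fencesOf
  have he : (PySem.Set.empty : PySem.Set Int) = ([] : List Int) := rfl
  rw [he, hfn, hB, hA, bodyA_eq]
  simp
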